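-- pv_equiv track=rewrite | github.com/koradon/captains-log | update_log.py | update_commit_entries
-- ===== SOURCE A (Python) =====
-- def parse_commit_entry(entry):
--     if entry.startswith("- (") and ") " in entry:
--         sha_end = entry.find(")")
--         sha = entry[3:sha_end]
--         message = entry[sha_end+2:]
--         return sha, message
--     return None, None
--
-- def update_commit_entries(entries, new_sha, new_msg):
--     to_remove = []
--     for i, entry in enumerate(entries):
--         sha, msg = parse_commit_entry(entry)
--         if msg == new_msg and sha != new_sha:
--             to_remove.append(i)
--         if sha == new_sha and msg == new_msg:
--             return entries
--
--     for i in reversed(to_remove):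
--         entries.pop(i)
--     entries.append(f"- ({new_sha}) {new_msg}")
--     return entries
-- ===== SOURCE B (Python) =====
-- def update_commit_entries(entries, new_sha, new_msg):
--     # Build the result back-to-front in one reversed pass; no index bookkeeping.
--     # Return-value equivalence with A: A mutates `entries` in place, B builds a new list.
--     out = []
--     for e in reversed(entries):
--         sha = msg = None
--         if e.startswith("- (") and ") " in e:
--             pre, _, post = e.partition(")")
--             sha, msg = pre[3:], post[1:]
--         if sha == new_sha and msg == new_msg:
--             return entries
--         if msg != new_msg:
--             out.append(e)
--     out.reverse()
--     out.append(f"- ({new_sha}) {new_msg}")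
--     return out
-- ===== Notes on version B (the rewrite author's own statement) =====
-- stated objective: alternative
-- what changed: B makes a single back-to-front pass with its own partition-based parser, accumulating the kept entries in reverse and returning early on an exact match, instead of A's forward enumerate loop that collects removal indices followed by a reversed pop loop; equivalence is about the return value (A mutates entries in place, B builds a new list).
import Mathlib
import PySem

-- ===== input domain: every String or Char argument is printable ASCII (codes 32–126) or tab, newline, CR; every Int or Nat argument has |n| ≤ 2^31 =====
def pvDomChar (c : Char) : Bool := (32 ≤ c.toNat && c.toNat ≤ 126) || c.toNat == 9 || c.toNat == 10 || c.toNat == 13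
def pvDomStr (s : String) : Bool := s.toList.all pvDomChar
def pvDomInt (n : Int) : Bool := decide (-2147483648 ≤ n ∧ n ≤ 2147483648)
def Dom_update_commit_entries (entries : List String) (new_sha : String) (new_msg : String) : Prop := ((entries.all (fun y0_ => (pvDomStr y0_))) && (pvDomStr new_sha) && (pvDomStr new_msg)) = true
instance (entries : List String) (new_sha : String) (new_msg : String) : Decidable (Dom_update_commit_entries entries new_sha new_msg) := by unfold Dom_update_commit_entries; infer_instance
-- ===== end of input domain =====

-- B replaces A's forward index-collecting loop plus reversed pop loop by a single back-to-front
-- pass with its own partition-based parser (objective: alternative). A mutates `entries` in place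
-- (pops/append) while B builds a fresh list; the equivalence proved here is about the RETURN value.

-- ===== PORT A =====
def parse_commit_entry (entry : String) : Option String × Option String :=
  if PySem.Str.startswith entry "- (" && PySem.Str.isIn ") " entry then
    let sha_end := PySem.Str.find entry ")"
    let sha := PySem.Str.slice entry (some 3) (some sha_end)
    let message := PySem.Str.slice entry (some (sha_end + 2)) none
    (some sha, some message)
  else (none, none)

-- `msg == new_msg and sha != new_sha` resp. `sha == new_sha and msg == new_msg` on the parse of an entry
def dupTest (new_sha new_msg e : String) : Bool :=
  decide ((parse_commit_entry e).2 = some new_msg ∧ (parse_commit_entry e).1 ≠ some new_sha)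
def exactTest (new_sha new_msg e : String) : Bool :=
  decide ((parse_commit_entry e).1 = some new_sha ∧ (parse_commit_entry e).2 = some new_msg)

-- entries.pop(i)
def popStep (es : List String) (i : Nat) : List String :=
  match PySem.List.pop? es (i : Int) with
  | some r => r.2
  | none => es

-- A's first loop: collects to_remove, `none` = the early `return entries`
def ucAux (new_sha new_msg : String) : List String → Nat → List Nat → Option (List Nat)
  | [], _, acc => some acc
  | e :: rest, i, acc =>
    let acc' := if dupTest new_sha new_msg e then acc ++ [i] else acc
    if exactTest new_sha new_msg e then none
    else ucAux new_sha new_msg rest (i + 1) acc'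

def update_commit_entries (entries : List String) (new_sha : String) (new_msg : String) : List String :=
  match ucAux new_sha new_msg entries 0 [] with
  | none => entries
  | some to_remove =>
      (to_remove.reverse.foldl popStep entries) ++ ["- (" ++ new_sha ++ ") " ++ new_msg]

-- ===== PORT B =====
-- B's inline parse: `sha = msg = None; if e.startswith("- (") and ") " in e:
--   pre, _, post = e.partition(")"); sha, msg = pre[3:], post[1:]`
-- partition at the first ')' is takeWhile/dropWhile on the char list; pre[3:]/post[1:] are drops.
def altParse (e : String) : Option String × Option String :=
  if PySem.Str.startswith e "- (" && PySem.Str.isIn ") " e then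
    (some (String.ofList ((e.toList.takeWhile (fun c => c ≠ ')')).drop 3)),
     some (String.ofList ((e.toList.dropWhile (fun c => c ≠ ')')).drop 2)))
  else (none, none)

-- B's reversed loop: walks reversed(entries) accumulating `out`; `none` = the early `return entries`
def goB (new_sha new_msg : String) : List String → List String → Option (List String)
  | [], out => some out
  | e :: rest, out =>
    let p := altParse e
    if p.1 = some new_sha ∧ p.2 = some new_msg then none
    else goB new_sha new_msg rest (if p.2 ≠ some new_msg then out ++ [e] else out)

def update_commit_entries_alt (entries : List String) (new_sha : String) (new_msg : String) : List String :=
  match goB new_sha new_msg entries.reverse [] with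
  | none => entries
  | some out => out.reverse ++ ["- (" ++ new_sha ++ ") " ++ new_msg]

-- ===== PRECONDITION & SPEC =====
def Spec_update_commit_entries (entries : List String) (new_sha : String) (new_msg : String) (out : List String) : Prop := out = update_commit_entries_alt entries new_sha new_msg
instance (entries : List String) (new_sha : String) (new_msg : String) (out : List String) : Decidable (Spec_update_commit_entries entries new_sha new_msg out) := by unfold Spec_update_commit_entries; infer_instance

-- ===== CLAIM (what is proved, stated in full; the proofs are below) =====
def Claim_equal_update_commit_entries : Prop := ∀ (entries : List String) (new_sha : String) (new_msg : String), Dom_update_commit_entries entries new_sha new_msg → Spec_update_commit_entries entries new_sha new_msg (update_commit_entries entries new_sha new_msg)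

-- ===== LEMMAS AND PROOFS =====

-- the dropWhile tail starts with ')' as soon as ')' occurs in the list
lemma dropWhile_head_close (cs : List Char) (h : ')' ∈ cs) :
    ∃ r, cs.dropWhile (fun c => c ≠ ')') = ')' :: r := by
  induction cs with
  | nil => simp at h
  | cons a t ih =>
    by_cases ha : a = ')'
    · exact ⟨t, by simp [ha]⟩
    · have ht : ')' ∈ t := by
        rcases List.mem_cons.mp h with h1 | h1
        · exact absurd h1.symm ha
        · exact h1
      obtain ⟨r, hr⟩ := ih ht
      exact ⟨r, by rw [List.dropWhile_cons, if_pos (by simp [ha]), hr]⟩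

-- str.find at the first ')' is the length of the takeWhile prefix
lemma find_char (cs : List Char) (h : ')' ∈ cs) :
    PySem.Chars.find cs [')'] = ((cs.takeWhile (fun c => c ≠ ')')).length : Int) := by
  have hinf : [')'] <:+: cs := by
    obtain ⟨s, t, rfl⟩ := List.append_of_mem h
    exact ⟨s, t, by simp⟩
  have hk0 : 0 ≤ PySem.Chars.find cs [')'] := (PySem.Chars.find_nonneg_iff cs [')']).mpr hinf
  obtain ⟨hpre, hmin⟩ := PySem.Chars.find_spec hk0
  have htwle : (cs.takeWhile (fun c => c ≠ ')')).length ≤ cs.length :=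
    (List.takeWhile_prefix _).length_le
  have hdw : cs.drop (cs.takeWhile (fun c => c ≠ ')')).length = cs.dropWhile (fun c => c ≠ ')') := by
    have h1 := List.takeWhile_append_dropWhile (p := fun c => decide (c ≠ ')')) (l := cs)
    have h2 : (cs.takeWhile (fun c => c ≠ ')') ++ cs.dropWhile (fun c => c ≠ ')')).drop
        (cs.takeWhile (fun c => c ≠ ')')).length = cs.dropWhile (fun c => c ≠ ')') := List.drop_left
    rwa [h1] at h2
  obtain ⟨rr, hrr⟩ := dropWhile_head_close cs h
  have hhead : [')'] <+: cs.drop (cs.takeWhile (fun c => c ≠ ')')).length := by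
    rw [hdw, hrr]
    exact ⟨rr, rfl⟩
  have h1 : ¬ ((cs.takeWhile (fun c => c ≠ ')')).length < (PySem.Chars.find cs [')']).toNat) :=
    fun hlt => (hmin _ hlt) hhead
  have h2 : ¬ ((PySem.Chars.find cs [')']).toNat < (cs.takeWhile (fun c => c ≠ ')')).length) := by
    intro hlt
    obtain ⟨r, hr⟩ := hpre
    have hklen : (PySem.Chars.find cs [')']).toNat < cs.length := by omega
    have hkval : cs[(PySem.Chars.find cs [')']).toNat] = ')' := by
      have : cs[(PySem.Chars.find cs [')']).toNat]? = some ')' := by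
        rw [← List.head?_drop, ← hr]; rfl
      simpa [List.getElem?_eq_getElem hklen] using this
    have htweq : (cs.takeWhile (fun c => c ≠ ')'))[(PySem.Chars.find cs [')']).toNat]'hlt = cs[(PySem.Chars.find cs [')']).toNat] :=
      (List.takeWhile_prefix _).getElem hlt
    have hmem : (cs.takeWhile (fun c => c ≠ ')'))[(PySem.Chars.find cs [')']).toNat]'hlt ∈ cs.takeWhile (fun c => c ≠ ')') :=
      List.getElem_mem _
    have := List.mem_takeWhile_imp hmem
    rw [htweq, hkval] at this
    simp at this
  omega

-- B's inline parse computes exactly A's parse_commit_entry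
lemma parse_eq (e : String) : altParse e = parse_commit_entry e := by
  unfold altParse parse_commit_entry
  by_cases hc : (PySem.Str.startswith e "- (" && PySem.Str.isIn ") " e) = true
  · simp only [hc, if_true]
    have hmem : ')' ∈ e.toList := by
      have hin : PySem.Str.isIn ") " e = true := by
        have := hc; simp only [Bool.and_eq_true] at this; exact this.2
      have : ([')', ' '] : List Char) <:+: e.toList := by
        have := (PySem.Str.isIn_iff_infix ") " e).mp hin
        simpa using this
      obtain ⟨l1, l2, hl⟩ := this
      rw [← hl]; simp
    have hfind : PySem.Str.find e ")" = ((e.toList.takeWhile (fun c => c ≠ ')')).length : Int) := by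
      rw [PySem.Str.find_eq]
      have : (")" : String).toList = [')'] := rfl
      rw [this]
      exact find_char e.toList hmem
    have htw : e.toList.takeWhile (fun c => c ≠ ')') = e.toList.take (e.toList.takeWhile (fun c => c ≠ ')')).length :=
      List.prefix_iff_eq_take.mp (List.takeWhile_prefix _)
    have hdw : e.toList.dropWhile (fun c => c ≠ ')') = e.toList.drop (e.toList.takeWhile (fun c => c ≠ ')')).length := by
      have h1 := List.takeWhile_append_dropWhile (p := fun c => decide (c ≠ ')')) (l := e.toList)
      have h2 : (e.toList.takeWhile (fun c => c ≠ ')') ++ e.toList.dropWhile (fun c => c ≠ ')')).drop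
          (e.toList.takeWhile (fun c => c ≠ ')')).length = e.toList.dropWhile (fun c => c ≠ ')') := List.drop_left
      rw [h1] at h2
      exact h2.symm
    refine Prod.ext ?_ ?_
    · simp only [Option.some.injEq]
      apply String.toList_inj.mp
      rw [hfind, PySem.Str.toList_slice, PySem.Chars.slice_eq_listSlice,
        PySem.List.slice_toNat e.toList (by omega) (by omega)]
      conv_lhs => rw [String.toList_ofList, htw]
      rw [List.drop_take]
      simp
    · simp only [Option.some.injEq]
      apply String.toList_inj.mp
      rw [hfind, PySem.Str.toList_slice, PySem.Chars.slice_eq_listSlice,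
        PySem.List.slice_from e.toList (by omega)]
      conv_lhs => rw [String.toList_ofList, hdw]
      rw [List.drop_drop]
      congr 1

  · have hc' : ¬ ((PySem.Str.startswith e "- (" && PySem.Str.isIn ") " e) = true) := hc
    rw [if_neg hc', if_neg hc']

-- the (strictly increasing) list of indices A's first loop collects
def dupIdxs (new_sha new_msg : String) : List String → List Nat
  | [] => []
  | e :: rest =>
      (if dupTest new_sha new_msg e then [0] else []) ++ (dupIdxs new_sha new_msg rest).map (· + 1)

lemma dupIdxs_lt (s m : String) : ∀ (xs : List String), ∀ i ∈ dupIdxs s m xs, i < xs.length := by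
  intro xs
  induction xs with
  | nil => simp [dupIdxs]
  | cons e rest ih =>
    intro i hi
    simp only [dupIdxs, List.mem_append] at hi
    rcases hi with hi | hi
    · split at hi <;> simp_all
    · obtain ⟨j, hj, rfl⟩ := List.mem_map.mp hi
      have := ih j hj
      simp [List.length_cons]; omega

lemma dupIdxs_sorted (s m : String) : ∀ (xs : List String), (dupIdxs s m xs).Pairwise (· < ·) := by
  intro xs
  induction xs with
  | nil => simp [dupIdxs]
  | cons e rest ih =>
    simp only [dupIdxs]
    rw [List.pairwise_append]
    refine ⟨by split <;> simp, (List.pairwise_map).mpr (ih.imp (by omega)), ?_⟩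
    intro a ha b hb
    obtain ⟨j, _, rfl⟩ := List.mem_map.mp hb
    split at ha <;> simp_all

lemma popFold_map_succ (l : List Nat) : ∀ (ys : List String) (x : String),
    (∀ i ∈ l, i < ys.length) → l.Pairwise (· > ·) →
    (l.map (· + 1)).foldl popStep (x :: ys) = x :: l.foldl popStep ys := by
  induction l with
  | nil => intro ys x _ _; simp
  | cons i l ih =>
    intro ys x hlt hpw
    have hi : i < ys.length := hlt i (by simp)
    have h1 : popStep (x :: ys) (i + 1) = x :: ys.eraseIdx i := by
      simp only [popStep]
      rw [PySem.List.pop?_natCast (x :: ys) (i + 1) (by simp; omega)]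
      simp [List.eraseIdx_cons_succ]
    have h2 : popStep ys i = ys.eraseIdx i := by
      simp only [popStep]
      rw [PySem.List.pop?_natCast ys i hi]
    simp only [List.map_cons, List.foldl_cons, h1, h2]
    apply ih
    · intro j hj
      have hji : j < i := (List.pairwise_cons.mp hpw).1 j hj
      rw [List.length_eraseIdx_of_lt hi]; omega
    · exact (List.pairwise_cons.mp hpw).2

lemma popFold_dupIdxs (s m : String) : ∀ (xs : List String),
    (dupIdxs s m xs).reverse.foldl popStep xs = xs.filter (fun e => !dupTest s m e) := by
  intro xs
  induction xs with
  | nil => simp [dupIdxs]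
  | cons e rest ih =>
    simp only [dupIdxs, List.reverse_append, List.foldl_append, List.map_reverse.symm]
    rw [popFold_map_succ]
    · rw [ih]
      by_cases hd : dupTest s m e
      · simp [hd, popStep, PySem.List.pop?_zero_cons]
      · simp [hd]
    · intro i hi
      exact dupIdxs_lt s m rest i (by simpa using hi)
    · exact (List.pairwise_reverse).mpr ((dupIdxs_sorted s m rest).imp (by omega))

lemma ucAux_none_iff (s m : String) : ∀ (xs : List String) (i : Nat) (acc : List Nat),
    ucAux s m xs i acc = none ↔ xs.any (exactTest s m) = true := by
  intro xs
  induction xs with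
  | nil => intro i acc; simp [ucAux]
  | cons e rest ih =>
    intro i acc
    simp only [ucAux, List.any_cons]
    by_cases he : exactTest s m e <;> simp [he, ih]

lemma ucAux_some (s m : String) : ∀ (xs : List String) (i : Nat) (acc : List Nat),
    xs.any (exactTest s m) = false →
    ucAux s m xs i acc = some (acc ++ (dupIdxs s m xs).map (· + i)) := by
  intro xs
  induction xs with
  | nil => intro i acc _; simp [ucAux, dupIdxs]
  | cons e rest ih =>
    intro i acc h
    simp only [List.any_cons, Bool.or_eq_false_iff] at h
    by_cases hd : dupTest s m e <;>
      simp [ucAux, h.1, hd, ih _ _ h.2, dupIdxs, List.map_map] <;>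
      exact fun a _ => by omega

-- B's reversed loop: `none` exactly when some entry is an exact match
lemma goB_none_iff (s m : String) : ∀ (ys out : List String),
    goB s m ys out = none ↔ ys.any (exactTest s m) = true := by
  intro ys
  induction ys with
  | nil => intro out; simp [goB]
  | cons e rest ih =>
    intro out
    simp only [goB, List.any_cons]
    by_cases hP : (parse_commit_entry e).1 = some s ∧ (parse_commit_entry e).2 = some m
    · simp [parse_eq, hP, exactTest]
    · simp [parse_eq, hP, exactTest, ih]

-- B's reversed loop with no exact match ahead: appends exactly the non-duplicate entries
lemma goB_some (s m : String) : ∀ (ys out : List String),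
    ys.any (exactTest s m) = false →
    goB s m ys out = some (out ++ ys.filter (fun e => !dupTest s m e)) := by
  intro ys
  induction ys with
  | nil => intro out _; simp [goB]
  | cons e rest ih =>
    intro out h
    simp only [List.any_cons, Bool.or_eq_false_iff] at h
    have hP : ¬ ((parse_commit_entry e).1 = some s ∧ (parse_commit_entry e).2 = some m) := by
      have := h.1; simpa [exactTest] using this
    by_cases hm : (parse_commit_entry e).2 = some m
    · have hsha : (parse_commit_entry e).1 ≠ some s := fun hs => hP ⟨hs, hm⟩
      have hd : dupTest s m e = true := by simp [dupTest, hm, hsha]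
      simp [goB, parse_eq, hm, hsha, ih _ h.2, hd]
    · have hd : dupTest s m e = false := by simp [dupTest, hm]
      simp [goB, parse_eq, hm, ih _ h.2, hd]

-- B in canonical form
lemma alt_eq (entries : List String) (s m : String) :
    update_commit_entries_alt entries s m =
      if entries.any (exactTest s m) then entries
      else entries.filter (fun e => !dupTest s m e) ++ ["- (" ++ s ++ ") " ++ m] := by
  unfold update_commit_entries_alt
  by_cases h : entries.any (exactTest s m)
  · rw [(goB_none_iff s m entries.reverse []).mpr (by simpa using h)]
    simp [h]
  · have hf : entries.reverse.any (exactTest s m) = false := by simpa using h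
    rw [goB_some s m entries.reverse [] hf]
    simp [h, List.filter_reverse]

-- ===== VERDICT (by name: the statement is the Claim_ definition above) =====
theorem update_commit_entries_spec : Claim_equal_update_commit_entries := by
  intro entries new_sha new_msg _
  unfold Spec_update_commit_entries update_commit_entries
  rw [alt_eq]
  by_cases h : entries.any (exactTest new_sha new_msg)
  · rw [(ucAux_none_iff new_sha new_msg entries 0 []).mpr h]
    simp [h]
  · have hf : entries.any (exactTest new_sha new_msg) = false := by simpa using h
    rw [ucAux_some new_sha new_msg entries 0 [] hf]
    have hmap : (dupIdxs new_sha new_msg entries).map (· + 0) = dupIdxs new_sha new_msg entries := by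
      simp
    simp only [List.nil_append, hmap, hf, if_false, Bool.false_eq_true]
    rw [popFold_dupIdxs]
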